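-- pv_equiv track=rewrite | github.com/JaydenGomes/AI-CODES | EXP5.py | try_place
-- ===== SOURCE A (Python) =====
-- def is_safe(i, j, placed):
--     for pi, pj in placed:
--         if pi == i or pj == j or abs(pi - i) == abs(pj - j):
--             return False
--     return True
--
-- def try_place(placed):
--     if len(placed) == 4:
--         return True
--     for i in range(4):
--         for j in range(4):
--             if (i, j) not in placed and is_safe(i, j, placed):
--                 if try_place(placed + [(i, j)]):
--                     return True
--     return False
-- ===== SOURCE B (Python) =====
-- def _ok(a, b):
--     return a[0] != b[0] and a[1] != b[1] and abs(a[0] - b[0]) != abs(a[1] - b[1])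
--
-- def _all_ok(comb):
--     if not comb:
--         return True
--     head, rest = comb[0], comb[1:]
--     return all(_ok(head, q) for q in rest) and _all_ok(rest)
--
-- def _combos(xs, k):
--     if k == 0:
--         return [[]]
--     if not xs:
--         return []
--     first, rest = xs[0], xs[1:]
--     return [[first] + c for c in _combos(rest, k - 1)] + _combos(rest, k)
--
-- def try_place(placed):
--     n = len(placed)
--     if n == 4:
--         return True
--     if n > 4:
--         return False
--     cells = [(i, j) for i in range(4) for j in range(4)]
--     cand = [c for c in cells if c not in placed and all(_ok(c, p) for p in placed)]
--     return any(_all_ok(combo) for combo in _combos(cand, 4 - n))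
-- ===== Notes on version B (the rewrite author's own statement) =====
-- stated objective: alternative
-- what changed: Replaces A's recursive backtracking over partial boards by a flat enumeration: compute the list of cells that are free and safe w.r.t. the given queens once, then test each (4-len(placed))-element combination of that list for being mutually non-attacking.
import Mathlib
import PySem

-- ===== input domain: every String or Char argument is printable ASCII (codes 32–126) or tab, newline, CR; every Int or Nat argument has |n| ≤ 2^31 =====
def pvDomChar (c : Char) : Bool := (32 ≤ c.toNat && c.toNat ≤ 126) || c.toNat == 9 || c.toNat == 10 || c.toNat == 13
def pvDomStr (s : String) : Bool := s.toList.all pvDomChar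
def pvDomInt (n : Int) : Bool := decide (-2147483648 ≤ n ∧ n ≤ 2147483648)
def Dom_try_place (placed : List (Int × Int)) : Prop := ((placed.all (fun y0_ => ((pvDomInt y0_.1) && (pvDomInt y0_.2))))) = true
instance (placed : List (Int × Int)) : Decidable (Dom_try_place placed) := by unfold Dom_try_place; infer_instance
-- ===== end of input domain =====

-- B replaces A's recursive backtracking by a flat enumeration of candidate-cell subsets of the needed
-- size (objective: alternative decomposition, no recursion over partial boards).

-- ===== PORT A =====
-- is_safe(i, j, placed): loop with early False = List.all of the negated condition
def is_safe (i j : Int) (placed : List (Int × Int)) : Bool :=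
  placed.all (fun p => !(p.1 == i || p.2 == j || ((p.1 - i).natAbs == (p.2 - j).natAbs)))

-- A's recursion adds only fresh grid cells, so its depth from any start is at most 16+1; fuel 17
-- therefore never runs out and the fuel recursion is A's recursion verbatim.
def tryPlaceFuel : Nat → List (Int × Int) → Bool
  | 0, _ => false
  | fuel+1, placed =>
    if placed.length == 4 then true
    else (PySem.List.pyRange 0 4 1).any (fun i =>
      (PySem.List.pyRange 0 4 1).any (fun j =>
        (!placed.contains (i, j) && is_safe i j placed)
          && tryPlaceFuel fuel (placed ++ [(i, j)])))

def try_place (placed : List (Int × Int)) : Bool := tryPlaceFuel 17 placed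

-- ===== PORT B =====
def okB (a b : Int × Int) : Bool :=
  a.1 != b.1 && (a.2 != b.2 && ((a.1 - b.1).natAbs != (a.2 - b.2).natAbs))

-- _all_ok(comb): head checked against the rest, then recurse
def allOkB : List (Int × Int) → Bool
  | [] => true
  | p :: rest => rest.all (okB p) && allOkB rest

-- _combos(xs, k): all k-element combinations of xs, in order
def combosB : List (Int × Int) → Nat → List (List (Int × Int))
  | _, 0 => [[]]
  | [], _+1 => []
  | x :: rest, k+1 => (combosB rest k).map (fun c => x :: c) ++ combosB rest (k+1)

def cellsB : List (Int × Int) :=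
  (PySem.List.pyRange 0 4 1).flatMap (fun i => (PySem.List.pyRange 0 4 1).map (fun j => (i, j)))

def candB (placed : List (Int × Int)) : List (Int × Int) :=
  cellsB.filter (fun c => !placed.contains c && placed.all (okB c))

def try_place_alt (placed : List (Int × Int)) : Bool :=
  if placed.length == 4 then true
  else if placed.length > 4 then false
  else (combosB (candB placed) (4 - placed.length)).any allOkB

-- ===== PRECONDITION & SPEC =====
def Spec_try_place (placed : List (Int × Int)) (out : Bool) : Prop := out = try_place_alt placed
instance (placed : List (Int × Int)) (out : Bool) : Decidable (Spec_try_place placed out) := by unfold Spec_try_place; infer_instance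

-- ===== CLAIM (what is proved, stated in full; the proofs are below) =====
def Claim_equal_try_place : Prop := ∀ (placed : List (Int × Int)), Dom_try_place placed → Spec_try_place placed (try_place placed)

-- ===== LEMMAS AND PROOFS =====

def okP (a b : Int × Int) : Prop :=
  a.1 ≠ b.1 ∧ a.2 ≠ b.2 ∧ (a.1 - b.1).natAbs ≠ (a.2 - b.2).natAbs

theorem okB_iff (a b : Int × Int) : okB a b = true ↔ okP a b := by
  simp [okB, okP]

theorem natAbs_sub_comm' (a b : Int) : (a - b).natAbs = (b - a).natAbs := by omega

theorem okP_symm {a b : Int × Int} (h : okP a b) : okP b a := by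
  obtain ⟨h1, h2, h3⟩ := h
  exact ⟨h1.symm, h2.symm, by rw [natAbs_sub_comm' b.1 a.1, natAbs_sub_comm' b.2 a.2]; exact h3⟩

theorem okP_ne {a b : Int × Int} (h : okP a b) : a ≠ b := by
  intro he; exact h.1 (by rw [he])

theorem okB_pointwise (i j : Int) (p : Int × Int) :
    okB (i, j) p = !(p.1 == i || p.2 == j || ((p.1 - i).natAbs == (p.2 - j).natAbs)) := by
  rw [Bool.eq_iff_iff]
  simp [okB]
  omega

theorem safeB_eq_is_safe (i j : Int) (placed : List (Int × Int)) :
    placed.all (okB (i, j)) = is_safe i j placed := by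
  unfold is_safe
  induction placed with
  | nil => rfl
  | cons p rest ih => simp only [List.all_cons, ih, okB_pointwise]

theorem mem_combosB (xs : List (Int × Int)) (k : Nat) (S : List (Int × Int)) :
    S ∈ combosB xs k ↔ S.Sublist xs ∧ S.length = k := by
  induction xs generalizing k S with
  | nil =>
    cases k with
    | zero => simp [combosB]
    | succ k =>
      simp only [combosB, List.not_mem_nil, false_iff, not_and]
      intro hs
      have hle := hs.length_le
      simp only [List.length_nil] at hle
      omega
  | cons x rest ih =>
    cases k with
    | zero =>
      simp only [combosB, List.mem_singleton, List.length_eq_zero_iff]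
      constructor
      · rintro rfl; exact ⟨List.nil_sublist _, rfl⟩
      · rintro ⟨_, rfl⟩; rfl
    | succ k =>
      simp only [combosB, List.mem_append, List.mem_map, ih]
      rw [List.sublist_cons_iff]
      constructor
      · rintro (⟨c, ⟨hsl, hlen⟩, rfl⟩ | ⟨hsl, hlen⟩)
        · exact ⟨Or.inr ⟨c, rfl, hsl⟩, by simp [hlen]⟩
        · exact ⟨Or.inl hsl, hlen⟩
      · rintro ⟨hsl | ⟨r, rfl, hr⟩, hlen⟩
        · exact Or.inr ⟨hsl, hlen⟩
        · exact Or.inl ⟨r, ⟨hr, by simpa using hlen⟩, rfl⟩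

theorem allOkB_iff (S : List (Int × Int)) : allOkB S = true ↔ S.Pairwise okP := by
  induction S with
  | nil => simp [allOkB]
  | cons p rest ih => simp [allOkB, ih, List.pairwise_cons, okB_iff, List.all_eq_true]

theorem candB_append (placed : List (Int × Int)) (c : Int × Int) :
    candB (placed ++ [c]) = (candB placed).filter (fun x => okB x c) := by
  unfold candB
  rw [List.filter_filter]
  apply List.filter_congr
  intro x _
  cases h : okB x c with
  | false => simp [h, List.all_append]
  | true =>
    have hxc : x ≠ c := okP_ne (okB_iff x c |>.mp h)
    simp [h, List.all_append, hxc]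

def freeN (placed : List (Int × Int)) : Nat :=
  (cellsB.filter (fun c => !placed.contains c)).length

theorem length_filter_lt_of_mem {α : Type} (l : List α) (p : α → Bool) (c : α)
    (hc : c ∈ l) (hpc : p c = false) : (l.filter p).length < l.length := by
  have h : ∃ x ∈ l, ¬ p x = true := ⟨c, hc, by simp [hpc]⟩
  simpa using h

theorem freeN_lt (placed : List (Int × Int)) (c : Int × Int)
    (hmem : c ∈ cellsB) (hnc : placed.contains c = false) :
    freeN (placed ++ [c]) < freeN placed := by
  unfold freeN
  have heq : cellsB.filter (fun x => !(placed ++ [c]).contains x)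
      = (cellsB.filter (fun x => !placed.contains x)).filter (fun x => !(x == c)) := by
    rw [List.filter_filter]
    apply List.filter_congr
    intro x _
    rw [Bool.eq_iff_iff]
    simp
    try tauto
  rw [heq]
  apply length_filter_lt_of_mem _ _ c
  · rw [List.mem_filter]; exact ⟨hmem, by simpa using hnc⟩
  · simp

def ExtP (placed : List (Int × Int)) (k : Nat) : Prop :=
  ∃ S : List (Int × Int), S.length = k ∧ S.Pairwise okP ∧ S ⊆ candB placed

theorem pairwise_nodup {S : List (Int × Int)} (h : S.Pairwise okP) : S.Nodup :=
  h.imp (fun hab => okP_ne hab)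

theorem okP_symmetric : Symmetric okP := fun _ _ h => okP_symm h

theorem alt_true_iff (placed : List (Int × Int)) (h : placed.length ≤ 4) :
    try_place_alt placed = true ↔ ExtP placed (4 - placed.length) := by
  unfold try_place_alt
  by_cases h4 : placed.length = 4
  · simp only [h4, beq_self_eq_true, if_pos, true_iff]
    exact ⟨[], rfl, List.Pairwise.nil, by simp⟩
  · have hlt : placed.length < 4 := lt_of_le_of_ne h h4
    rw [if_neg (by simpa using h4), if_neg (by omega)]
    rw [List.any_eq_true]
    constructor
    · rintro ⟨S, hS, hok⟩
      rw [mem_combosB] at hS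
      exact ⟨S, hS.2, (allOkB_iff S).mp hok, hS.1.subset⟩
    · rintro ⟨S, hlen, hpw, hsub⟩
      obtain ⟨S', hperm, hsl⟩ := (pairwise_nodup hpw).subperm hsub
      refine ⟨S', (mem_combosB _ _ _).mpr ⟨hsl, by rw [hperm.length_eq, hlen]⟩,
        (allOkB_iff _).mpr ?_⟩
      exact (List.Perm.pairwise_iff @okP_symmetric hperm.symm).mp hpw

theorem ext_step (placed : List (Int × Int)) (k : Nat) :
    ExtP placed (k + 1) ↔ ∃ c ∈ candB placed, ExtP (placed ++ [c]) k := by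
  constructor
  · rintro ⟨S, hlen, hpw, hsub⟩
    cases S with
    | nil => simp at hlen
    | cons c S' =>
      have hc : c ∈ candB placed := hsub (List.mem_cons_self)
      rcases List.pairwise_cons.mp hpw with ⟨hhead, hpw'⟩
      refine ⟨c, hc, S', by simpa using hlen, hpw', ?_⟩
      intro x hx
      rw [candB_append]
      apply List.mem_filter.mpr
      exact ⟨hsub (List.mem_cons_of_mem _ hx), (okB_iff x c).mpr (okP_symm (hhead x hx))⟩
  · rintro ⟨c, hc, S', hlen, hpw, hsub⟩
    refine ⟨c :: S', by simp [hlen], ?_, ?_⟩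
    · rw [List.pairwise_cons]
      refine ⟨fun x hx => ?_, hpw⟩
      have hm := hsub hx
      rw [candB_append, List.mem_filter] at hm
      exact okP_symm ((okB_iff x c).mp hm.2)
    · intro x hx
      rcases List.mem_cons.mp hx with rfl | hx'
      · exact hc
      · have hm := hsub hx'
        rw [candB_append, List.mem_filter] at hm
        exact hm.1

theorem mem_cellsB (c : Int × Int) :
    c ∈ cellsB ↔ c.1 ∈ PySem.List.pyRange 0 4 1 ∧ c.2 ∈ PySem.List.pyRange 0 4 1 := by
  cases c with
  | mk i j =>
    simp only [cellsB, List.mem_flatMap, List.mem_map, Prod.mk.injEq]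
    constructor
    · rintro ⟨a, ha, b, hb, rfl, rfl⟩; exact ⟨ha, hb⟩
    · rintro ⟨hi, hj⟩; exact ⟨i, hi, j, hj, rfl, rfl⟩

theorem main_lemma (fuel : Nat) :
    ∀ placed : List (Int × Int), freeN placed < fuel →
      tryPlaceFuel fuel placed = try_place_alt placed := by
  induction fuel with
  | zero => intro placed h; omega
  | succ f ih =>
    intro placed h
    by_cases h4 : placed.length = 4
    · simp [tryPlaceFuel, try_place_alt, h4]
    · rw [Bool.eq_iff_iff]
      have hstep : ∀ c : Int × Int, c ∈ candB placed →
          tryPlaceFuel f (placed ++ [c]) = try_place_alt (placed ++ [c]) := by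
        intro c hcand
        rcases List.mem_filter.mp hcand with ⟨hcell, hpred⟩
        rcases Bool.and_eq_true_iff.mp hpred with ⟨hnc, _⟩
        apply ih
        have := freeN_lt placed c hcell (by simpa using hnc)
        omega
      have hb4 : (placed.length == 4) = false := by simpa using h4
      have hA : tryPlaceFuel (f + 1) placed = true ↔
          ∃ c ∈ candB placed, try_place_alt (placed ++ [c]) = true := by
        simp only [tryPlaceFuel, hb4, Bool.false_eq_true, if_false, List.any_eq_true]
        constructor
        · rintro ⟨i, hi, j, hj, hcr⟩
          rcases Bool.and_eq_true_iff.mp hcr with ⟨hcond, hrec⟩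
          have hcand : (i, j) ∈ candB placed := by
            apply List.mem_filter.mpr
            refine ⟨(mem_cellsB (i, j)).mpr ⟨hi, hj⟩, ?_⟩
            rwa [safeB_eq_is_safe]
          exact ⟨(i, j), hcand, by rw [← hstep _ hcand]; exact hrec⟩
        · rintro ⟨c, hcand, halt⟩
          rcases List.mem_filter.mp hcand with ⟨hcell, hpred⟩
          rcases (mem_cellsB c).mp hcell with ⟨h1, h2⟩
          refine ⟨c.1, h1, c.2, h2, ?_⟩
          rw [Bool.and_eq_true_iff]
          constructor
          · rw [safeB_eq_is_safe] at hpred; exact hpred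
          · rw [hstep c hcand]; exact halt
      rw [hA]
      by_cases hg : 4 < placed.length
      · have hBfalse : try_place_alt placed = false := by
          unfold try_place_alt
          rw [if_neg (by simpa using h4), if_pos hg]
        rw [hBfalse]
        simp only [Bool.false_eq_true, iff_false, not_exists, not_and]
        intro c hcand
        have hlen1 : (placed ++ [c]).length = placed.length + 1 := by
          simp only [List.length_append, List.length_cons, List.length_nil]
        have : try_place_alt (placed ++ [c]) = false := by
          unfold try_place_alt
          rw [if_neg (by rw [hlen1]; simp; omega), if_pos (by rw [hlen1]; omega)]
        simp [this]
      · have hlt : placed.length < 4 := by omega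
        have harith : 4 - placed.length = (3 - placed.length) + 1 := by omega
        rw [alt_true_iff placed (by omega), harith, ext_step]
        apply exists_congr; intro c
        apply and_congr_right; intro hcand
        have hlen1 : (placed ++ [c]).length = placed.length + 1 := by
          simp only [List.length_append, List.length_cons, List.length_nil]
        rw [alt_true_iff (placed ++ [c]) (by rw [hlen1]; omega)]
        have h34 : 4 - (placed ++ [c]).length = 3 - placed.length := by rw [hlen1]; omega
        rw [h34]

-- ===== VERDICT (by name: the statement is the Claim_ definition above) =====
theorem try_place_spec : Claim_equal_try_place := by
  intro placed _
  unfold Spec_try_place try_place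
  apply main_lemma
  have : freeN placed ≤ cellsB.length := List.length_filter_le _ _
  have h16 : cellsB.length = 16 := by decide
  omega
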